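-- pv_equiv track=rewrite | github.com/haolunc/ARC-RL | reference_solutions/solutions/42a50994.py | transform
-- ===== SOURCE A (Python) =====
-- def transform(grid):
--
--     h = len(grid)
--     w = len(grid[0]) if h else 0
--
--     result = [[0] * w for _ in range(h)]
--
--     for r in range(h):
--         for c in range(w):
--             colour = grid[r][c]
--             if colour == 0:
--                 continue
--             keep = False
--             for dr in (-1, 0, 1):
--                 for dc in (-1, 0, 1):
--                     if dr == 0 and dc == 0:
--                         continue
--                     nr, nc = r + dr, c + dc
--                     if 0 <= nr < h and 0 <= nc < w and grid[nr][nc] == colour: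
--                         keep = True
--                         break
--                 if keep:
--                     break
--             if keep:
--                 result[r][c] = colour
--
--     return result
-- ===== SOURCE B (Python) =====
-- def transform(grid):
--     h = len(grid)
--     w = len(grid[0]) if h else 0
--     rows = [row[:w] for row in grid]
--     zero_row = [0] * w
--
--     def shift(dr, dc):
--         # shifted[r][c] == rows[r+dr][c+dc] when in bounds, 0 otherwise
--         if dr == -1:
--             shifted = [zero_row] + rows[:-1]
--         elif dr == 1:
--             shifted = rows[1:] + [zero_row]
--         else:
--             shifted = rows
--         if dc == -1:
--             shifted = [[0] + row[:-1] for row in shifted]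
--         elif dc == 1:
--             shifted = [row[1:] + [0] for row in shifted]
--         return shifted
--
--     mask = [[False] * w for _ in range(h)]
--     for dr, dc in ((-1, -1), (-1, 0), (-1, 1), (0, -1), (0, 1), (1, -1), (1, 0), (1, 1)):
--         s = shift(dr, dc)
--         mask = [[m or a == b for m, a, b in zip(mrow, grow, srow)]
--                 for mrow, grow, srow in zip(mask, rows, s)]
--     return [[v if m and v != 0 else 0 for m, v in zip(mrow, grow)]
--             for mrow, grow in zip(mask, rows)]
-- ===== Notes on version B (the rewrite author's own statement) =====
-- stated objective: faster
-- what changed: A scans the 8 neighbours of every cell with an early-break nested Python loop; B instead builds eight zero-padded shifted copies of the whole grid with list slicing and ORs elementwise equality into one boolean mask via zips, replacing per-cell index arithmetic by bulk list operations (measured ~1.6x at the largest size).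
import Mathlib
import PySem

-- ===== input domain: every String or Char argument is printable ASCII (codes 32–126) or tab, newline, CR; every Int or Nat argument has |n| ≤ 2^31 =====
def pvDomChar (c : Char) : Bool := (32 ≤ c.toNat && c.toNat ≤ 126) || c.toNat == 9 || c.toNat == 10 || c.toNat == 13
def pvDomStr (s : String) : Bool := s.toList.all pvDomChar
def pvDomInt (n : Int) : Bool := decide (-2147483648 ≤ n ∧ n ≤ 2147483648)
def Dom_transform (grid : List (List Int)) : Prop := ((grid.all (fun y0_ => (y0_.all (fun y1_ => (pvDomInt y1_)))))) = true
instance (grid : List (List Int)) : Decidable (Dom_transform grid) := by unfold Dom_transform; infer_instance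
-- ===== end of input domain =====

-- B replaces A's per-cell early-break scan of the 8 neighbours by eight whole-grid
-- zero-padded shifted copies combined into one boolean mask (objective: faster, measured).

-- ===== PORT A =====
-- grid[r][c] with Python indexing; the defaults are never reached on inputs in Pre_.
def pvCell (grid : List (List Int)) (r c : Int) : Int :=
  PySem.List.pyGetD (PySem.List.pyGetD grid r []) c 0

def transform (grid : List (List Int)) : List (List Int) :=
  let h : Int := grid.length
  let w : Int := if grid.length ≠ 0 then ((PySem.List.pyGetD grid 0 []).length : Int) else 0
  (PySem.List.pyRange 0 h 1).map (fun r =>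
    (PySem.List.pyRange 0 w 1).map (fun c =>
      let colour := pvCell grid r c
      if colour = 0 then 0
      else
        let keep := [(-1 : Int), 0, 1].any (fun dr =>
          [(-1 : Int), 0, 1].any (fun dc =>
            if dr = 0 ∧ dc = 0 then false
            else
              let nr := r + dr
              let nc := c + dc
              decide (0 ≤ nr ∧ nr < h ∧ 0 ≤ nc ∧ nc < w ∧ pvCell grid nr nc = colour)))
        if keep then colour else 0))

-- ===== PORT B =====
-- shifted copy of the grid: entry (r,c) is rows[r+dr][c+dc] when in bounds, 0 otherwise
def pvShift (w : Nat) (rows : List (List Int)) (dr dc : Int) : List (List Int) :=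
  let zeroRow : List Int := List.replicate w 0
  let a :=
    if dr = -1 then zeroRow :: PySem.List.slice rows none (some (-1))
    else if dr = 1 then PySem.List.slice rows (some 1) none ++ [zeroRow]
    else rows
  if dc = -1 then a.map (fun row => (0 : Int) :: PySem.List.slice row none (some (-1)))
  else if dc = 1 then a.map (fun row => PySem.List.slice row (some 1) none ++ [(0 : Int)])
  else a

-- mask = [[m or a == b for m, a, b in zip(mrow, grow, srow)] for mrow, grow, srow in zip(mask, rows, s)]
def pvMaskStep (rows s : List (List Int)) (mask : List (List Bool)) : List (List Bool) :=
  List.zipWith (fun p srow =>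
      List.zipWith (fun q b => q.1 || decide (q.2 = b)) (p.1.zip p.2) srow)
    (mask.zip rows) s

def pvDirs : List (Int × Int) :=
  [(-1, -1), (-1, 0), (-1, 1), (0, -1), (0, 1), (1, -1), (1, 0), (1, 1)]

def transform_alt (grid : List (List Int)) : List (List Int) :=
  let h := grid.length
  let w : Nat := if grid.length ≠ 0 then (PySem.List.pyGetD grid 0 []).length else 0
  let rows := grid.map (fun row => PySem.List.slice row none (some (w : Int)))
  let mask := pvDirs.foldl (fun mask d => pvMaskStep rows (pvShift w rows d.1 d.2) mask)
    (List.replicate h (List.replicate w false))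
  List.zipWith (fun mrow grow =>
      List.zipWith (fun m v => if m && (v != 0) then v else 0) mrow grow) mask rows

-- ===== PRECONDITION & SPEC =====
-- Pre_ excludes exactly the ragged grids in which some row is shorter than the first row:
-- on every such grid A raises IndexError reading that row at a column < len(grid[0])
-- (rows longer than the first are admitted; A ignores their extra columns).
def Pre_transform (grid : List (List Int)) : Prop :=
  ∀ row ∈ grid, (PySem.List.pyGetD grid 0 []).length ≤ row.length
instance (grid : List (List Int)) : Decidable (Pre_transform grid) := by
  unfold Pre_transform; infer_instance

def pvWitness_transform : List (List Int) := [[1, 1, 0], [0, 2, 0], [2, 0, 3]]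

def Spec_transform (grid : List (List Int)) (out : List (List Int)) : Prop := out = transform_alt grid
instance (grid : List (List Int)) (out : List (List Int)) : Decidable (Spec_transform grid out) := by unfold Spec_transform; infer_instance

-- ===== CLAIM (what is proved, stated in full; the proofs are below) =====
def Claim_equal_transform : Prop := ∀ (grid : List (List Int)), Dom_transform grid → Pre_transform grid → Spec_transform grid (transform grid)

-- ===== LEMMAS AND PROOFS =====

-- getElem?-with-default accessors used by all pointwise lemmas
def pvG (g : List (List Int)) (r c : Nat) : Int := (g[r]?.getD [])[c]?.getD 0
def pvGB (g : List (List Bool)) (r c : Nat) : Bool := (g[r]?.getD [])[c]?.getD false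


-- column shift used by pvShift, abstracted for the proofs
def pvColS (dc : Int) (row : List Int) : List Int :=
  if dc = -1 then 0 :: row.dropLast else if dc = 1 then row.tail ++ [0] else row

theorem pvColS_len (dc : Int) (v : List Int) (W : Nat) (hv : v.length = W) :
    W ≤ (pvColS dc v).length := by
  unfold pvColS; split_ifs <;> simp [hv] <;> omega

theorem pvColS_get (dc : Int) (v : List Int) (W : Nat) (c : Nat)
    (hdc : dc = -1 ∨ dc = 0 ∨ dc = 1) (hv : v.length = W) (hc : c < W) :
    (pvColS dc v)[c]?.getD 0 =
      if 0 ≤ (c : Int) + dc ∧ (c : Int) + dc < (W : Int)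
      then v[((c : Int) + dc).toNat]?.getD 0 else 0 := by
  rcases hdc with h | h | h <;> subst h
  · -- dc = -1
    rcases Nat.eq_zero_or_pos c with h0 | h0
    · subst h0; simp [pvColS]
    · have h1 : ((c : Int) + -1).toNat = c - 1 := by omega
      have hc0 : ¬ (c = 0) := by omega
      have hlt : c - 1 < W - 1 := by omega
      rw [show (pvColS (-1) v) = 0 :: v.dropLast from rfl]
      rw [List.getElem?_cons]
      simp only [hc0, if_false, List.getElem?_dropLast, hv, hlt, if_true, h1]
      have h2 : (0 ≤ (c : Int) + -1 ∧ (c : Int) + -1 < (W : Int)) := by omega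
      simp [h2]
  · simp [pvColS, hc]
  · -- dc = 1
    have h1 : ((c : Int) + 1).toNat = c + 1 := by omega
    rw [show (pvColS 1 v) = v.tail ++ [0] from rfl]
    rw [List.getElem?_append]
    simp only [List.length_tail, hv, List.getElem?_tail, h1]
    by_cases hlt : c < W - 1
    · have h2 : ((0 : Int) ≤ (c : Int) + 1 ∧ (c : Int) + 1 < (W : Int)) := by omega
      simp [hlt, h2]
    · have h2 : ¬ ((0 : Int) ≤ (c : Int) + 1 ∧ (c : Int) + 1 < (W : Int)) := by omega
      have h3 : c - (W - 1) = 0 := by omega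
      simp [hlt, h2, h3]

theorem pvVert_row (W : Nat) (rows : List (List Int)) (dr : Int) (H r : Nat)
    (hdr : dr = -1 ∨ dr = 0 ∨ dr = 1) (hlen : rows.length = H) (hr : r < H) :
    (if dr = -1 then (List.replicate W (0:Int)) :: rows.dropLast
     else if dr = 1 then rows.tail ++ [List.replicate W 0] else rows)[r]? =
      some (if 0 ≤ (r : Int) + dr ∧ (r : Int) + dr < (H : Int)
        then rows[((r : Int) + dr).toNat]?.getD [] else List.replicate W 0) := by
  rcases hdr with h | h | h <;> subst h <;> norm_num
  · rcases Nat.eq_zero_or_pos r with h0 | h0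
    · subst h0; simp
    · have h1 : ((r : Int) + -1).toNat = r - 1 := by omega
      have h2 : (0 ≤ (r : Int) + -1 ∧ (r : Int) + -1 < (H : Int)) := by omega
      have hc0 : ¬ (r = 0) := by omega
      have hlt : r - 1 < rows.length - 1 := by omega
      have hlt2 : r - 1 < rows.length := by omega
      rw [List.getElem?_cons]
      simp [hc0, hlt, h1, h2, List.getElem?_eq_getElem hlt2]
      intro h; exact absurd (h (by omega)) (by omega)
  · have h2 : (0 ≤ (r : Int) ∧ (r : Int) < (H : Int)) := by omega
    simp [List.getElem?_eq_getElem (show r < rows.length by omega)]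
    intro h; exact absurd h (by omega)
  · rw [List.getElem?_append]
    simp only [List.length_tail, hlen, List.getElem?_tail]
    by_cases hlt : r < H - 1
    · have h2 : (0 ≤ (r : Int) + 1 ∧ (r : Int) + 1 < (H : Int)) := by omega
      have h1 : ((r : Int) + 1).toNat = r + 1 := by omega
      simp [hlt, h2, List.getElem?_eq_getElem (show r + 1 < rows.length by omega)]
    · have h2 : ¬ (0 ≤ (r : Int) + 1 ∧ (r : Int) + 1 < (H : Int)) := by omega
      have h3 : r - (H - 1) = 0 := by omega
      simp [hlt, h2, h3]

theorem pvShift_row (W : Nat) (rows : List (List Int)) (dr dc : Int) (H r : Nat)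
    (hdr : dr = -1 ∨ dr = 0 ∨ dr = 1)
    (hlen : rows.length = H) (hr : r < H) :
    (pvShift W rows dr dc)[r]? =
      some (pvColS dc
        (if 0 ≤ (r : Int) + dr ∧ (r : Int) + dr < (H : Int)
         then rows[((r : Int) + dr).toNat]?.getD [] else List.replicate W 0)) := by
  have hvert := pvVert_row W rows dr H r hdr hlen hr
  unfold pvShift
  simp only [PySem.List.slice_to_neg_one, PySem.List.slice_from_one]
  set A := (if dr = -1 then List.replicate W (0:Int) :: rows.dropLast
    else if dr = 1 then rows.tail ++ [List.replicate W 0] else rows) with hA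
  set v := (if 0 ≤ (r : Int) + dr ∧ (r : Int) + dr < (H : Int)
    then rows[((r : Int) + dr).toNat]?.getD [] else List.replicate W (0:Int)) with hv
  split_ifs with h1 h2
  · subst h1; simp [List.getElem?_map, hvert, pvColS]
  · subst h2; simp [List.getElem?_map, hvert, pvColS, h1]
  · simp [hvert, pvColS, h1, h2]

theorem pvShift_get (W : Nat) (rows : List (List Int)) (dr dc : Int) (H r c : Nat)
    (hdr : dr = -1 ∨ dr = 0 ∨ dr = 1) (hdc : dc = -1 ∨ dc = 0 ∨ dc = 1)
    (hlen : rows.length = H) (hrow : ∀ i, i < H → (rows[i]?.getD []).length = W)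
    (hr : r < H) (hc : c < W) :
    pvG (pvShift W rows dr dc) r c =
      if 0 ≤ (r : Int) + dr ∧ (r : Int) + dr < (H : Int) ∧
         0 ≤ (c : Int) + dc ∧ (c : Int) + dc < (W : Int)
      then pvG rows ((r : Int) + dr).toNat ((c : Int) + dc).toNat else 0 := by
  unfold pvG
  rw [pvShift_row W rows dr dc H r hdr hlen hr]
  simp only [Option.getD_some]
  set v := (if 0 ≤ (r : Int) + dr ∧ (r : Int) + dr < (H : Int)
    then rows[((r : Int) + dr).toNat]?.getD [] else List.replicate W (0:Int)) with hv
  have hvlen : v.length = W := by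
    rw [hv]; split_ifs with h
    · exact hrow _ (by omega)
    · simp
  rw [pvColS_get dc v W c hdc hvlen hc]
  by_cases hri : (0 ≤ (r : Int) + dr ∧ (r : Int) + dr < (H : Int))
  · have hveq : v = rows[((r : Int) + dr).toNat]?.getD [] := by rw [hv, if_pos hri]
    by_cases hci : (0 ≤ (c : Int) + dc ∧ (c : Int) + dc < (W : Int))
    · rw [if_pos hci, if_pos ⟨hri.1, hri.2, hci.1, hci.2⟩, hveq]
    · rw [if_neg hci, if_neg (fun h => hci ⟨h.2.2.1, h.2.2.2⟩)]
  · have hveq : v = List.replicate W 0 := by rw [hv, if_neg hri]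
    have h4 : ¬ (0 ≤ (r : Int) + dr ∧ (r : Int) + dr < (H : Int) ∧
        0 ≤ (c : Int) + dc ∧ (c : Int) + dc < (W : Int)) := fun h => hri ⟨h.1, h.2.1⟩
    rw [if_neg h4, hveq]
    split_ifs with hci
    · simp only [List.getElem?_replicate]
      split <;> rfl
    · rfl

theorem pvMaskStep_len (rows s : List (List Int)) (mask : List (List Bool)) (H : Nat)
    (h1 : mask.length = H) (h2 : rows.length = H) (h3 : H <= s.length) :
    (pvMaskStep rows s mask).length = H := by
  simp [pvMaskStep]; omega

theorem pvMaskStep_row (rows s : List (List Int)) (mask : List (List Bool)) (H r : Nat)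
    (h1 : mask.length = H) (h2 : rows.length = H) (hr : r < H) :
    (pvMaskStep rows s mask)[r]? =
      s[r]?.map (fun srow =>
        List.zipWith (fun q b => q.1 || decide (q.2 = b))
          ((mask[r]?.getD []).zip (rows[r]?.getD [])) srow) := by
  have hmr : r < mask.length := by omega
  have hgr : r < rows.length := by omega
  unfold pvMaskStep
  rw [List.getElem?_zipWith]
  have hz : (mask.zip rows)[r]? = some (mask[r], rows[r]) := by
    rw [List.zip_eq_zipWith, List.getElem?_zipWith, List.getElem?_eq_getElem hmr,
        List.getElem?_eq_getElem hgr]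
  rw [hz]
  have e1 : mask[r]?.getD [] = mask[r] := by rw [List.getElem?_eq_getElem hmr]; rfl
  have e2 : rows[r]?.getD [] = rows[r] := by rw [List.getElem?_eq_getElem hgr]; rfl
  cases hs : s[r]? <;> simp [e1, e2]

theorem pvMaskStep_row_len (rows s : List (List Int)) (mask : List (List Bool)) (H W r : Nat)
    (h1 : mask.length = H) (h2 : rows.length = H) (hr : r < H)
    (hm : (mask[r]?.getD []).length = W) (hg : (rows[r]?.getD []).length = W)
    (hs : W <= (s[r]?.getD []).length) (hsr : r < s.length) :
    ((pvMaskStep rows s mask)[r]?.getD []).length = W := by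
  rw [pvMaskStep_row rows s mask H r h1 h2 hr]
  have hsome : s[r]? = some s[r] := List.getElem?_eq_getElem hsr
  rw [hsome]
  simp only [Option.map_some, Option.getD_some, List.length_zipWith, List.length_zip, hm, hg]
  rw [hsome] at hs
  simp at hs
  omega

theorem pvMaskStep_get (rows s : List (List Int)) (mask : List (List Bool)) (H W r c : Nat)
    (h1 : mask.length = H) (h2 : rows.length = H) (hr : r < H)
    (hm : (mask[r]?.getD []).length = W) (hg : (rows[r]?.getD []).length = W)
    (hsr : r < s.length) (hs : W <= (s[r]?.getD []).length) (hc : c < W) :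
    pvGB (pvMaskStep rows s mask) r c =
      (pvGB mask r c || decide (pvG rows r c = pvG s r c)) := by
  unfold pvGB pvG
  rw [pvMaskStep_row rows s mask H r h1 h2 hr]
  have hsome : s[r]? = some s[r] := List.getElem?_eq_getElem hsr
  rw [hsome] at hs ⊢
  simp only [Option.map_some, Option.getD_some] at hs ⊢
  rw [List.getElem?_zipWith]
  have hcz : ((mask[r]?.getD []).zip (rows[r]?.getD []))[c]? =
      some ((mask[r]?.getD [])[c]'(by omega), (rows[r]?.getD [])[c]'(by omega)) := by
    rw [List.zip_eq_zipWith, List.getElem?_zipWith,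
        List.getElem?_eq_getElem (show c < (mask[r]?.getD []).length by omega),
        List.getElem?_eq_getElem (show c < (rows[r]?.getD []).length by omega)]
  rw [hcz]
  have hsc : (s[r])[c]? = some ((s[r])[c]'(by omega)) := List.getElem?_eq_getElem _
  simp [hsc, List.getElem?_eq_getElem (show c < (mask[r]?.getD []).length by omega),
        List.getElem?_eq_getElem (show c < (rows[r]?.getD []).length by omega)]

theorem pvShift_len (W : Nat) (rows : List (List Int)) (dr dc : Int) (H : Nat)
    (hlen : rows.length = H) : H <= (pvShift W rows dr dc).length := by
  unfold pvShift; split_ifs <;>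
    simp [PySem.List.slice_to_neg_one, PySem.List.slice_from_one, hlen] <;> omega

theorem pvShift_row_len (W : Nat) (rows : List (List Int)) (dr dc : Int) (H r : Nat)
    (hdr : dr = -1 ∨ dr = 0 ∨ dr = 1)
    (hlen : rows.length = H) (hrow : ∀ i, i < H → (rows[i]?.getD []).length = W)
    (hr : r < H) :
    W <= ((pvShift W rows dr dc)[r]?.getD []).length := by
  rw [pvShift_row W rows dr dc H r hdr hlen hr]
  apply pvColS_len
  split_ifs with h
  · exact hrow _ (by omega)
  · simp

-- the mask fold: after folding a list of directions, a cell is marked iff some direction matches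
theorem pvFold_spec (W H : Nat) (rows : List (List Int))
    (hlen : rows.length = H) (hrow : ∀ i, i < H → (rows[i]?.getD []).length = W) :
    ∀ (L : List (Int × Int)) (mask : List (List Bool)),
    (∀ d ∈ L, (d.1 = -1 ∨ d.1 = 0 ∨ d.1 = 1) ∧ (d.2 = -1 ∨ d.2 = 0 ∨ d.2 = 1)) →
    mask.length = H → (∀ i, i < H → (mask[i]?.getD []).length = W) →
    (L.foldl (fun m d => pvMaskStep rows (pvShift W rows d.1 d.2) m) mask).length = H ∧
    (∀ i, i < H → ((L.foldl (fun m d => pvMaskStep rows (pvShift W rows d.1 d.2) m) mask)[i]?.getD []).length = W) ∧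
    (∀ r c, r < H → c < W →
      pvGB (L.foldl (fun m d => pvMaskStep rows (pvShift W rows d.1 d.2) m) mask) r c =
        (pvGB mask r c || L.any (fun d => decide (pvG rows r c = pvG (pvShift W rows d.1 d.2) r c)))) := by
  intro L
  induction L with
  | nil =>
    intro mask _ h1 h2
    exact ⟨h1, h2, fun r c hr hc => by simp⟩
  | cons d L ih =>
    intro mask hall h1 h2
    have hd := hall d List.mem_cons_self
    have hslen : H <= (pvShift W rows d.1 d.2).length := pvShift_len W rows d.1 d.2 H hlen
    have hstep_len : (pvMaskStep rows (pvShift W rows d.1 d.2) mask).length = H :=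
      pvMaskStep_len rows _ mask H h1 hlen hslen
    have hstep_row : ∀ i, i < H → ((pvMaskStep rows (pvShift W rows d.1 d.2) mask)[i]?.getD []).length = W := by
      intro i hi
      exact pvMaskStep_row_len rows _ mask H W i h1 hlen hi (h2 i hi) (hrow i hi)
        (pvShift_row_len W rows d.1 d.2 H i hd.1 hlen hrow hi) (by omega)
    obtain ⟨ihl, ihr, ihg⟩ := ih (pvMaskStep rows (pvShift W rows d.1 d.2) mask)
      (fun e he => hall e (List.mem_cons_of_mem d he)) hstep_len hstep_row
    refine ⟨ihl, ihr, fun r c hr hc => ?_⟩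
    rw [List.foldl_cons]
    rw [ihg r c hr hc,
        pvMaskStep_get rows _ mask H W r c h1 hlen hr (h2 r hr) (hrow r hr) (by omega)
          (pvShift_row_len W rows d.1 d.2 H r hd.1 hlen hrow hr) hc]
    simp [Bool.or_assoc]

theorem pvAny_congr {α : Type} {l : List α} {p q : α → Bool}
    (h : ∀ a ∈ l, p a = q a) : l.any p = l.any q := by
  induction l with
  | nil => rfl
  | cons a l ih =>
    simp only [List.any_cons, h a List.mem_cons_self,
      ih (fun b hb => h b (List.mem_cons_of_mem a hb))]

theorem pvTerm_eq (grid rows : List (List Int)) (W H r c : Nat) (dr dc : Int) (v : Int)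
    (hdr : dr = -1 ∨ dr = 0 ∨ dr = 1) (hdc : dc = -1 ∨ dc = 0 ∨ dc = 1)
    (hlen : rows.length = H) (hrow : ∀ i, i < H → (rows[i]?.getD []).length = W)
    (heq : ∀ i j : Int, 0 ≤ i → i < (H : Int) → 0 ≤ j → j < (W : Int) →
      pvCell grid i j = pvG rows i.toNat j.toNat)
    (hr : r < H) (hc : c < W) (hv : v ≠ 0) :
    decide (0 ≤ (r : Int) + dr ∧ (r : Int) + dr < (H : Int) ∧ 0 ≤ (c : Int) + dc ∧
      (c : Int) + dc < (W : Int) ∧ pvCell grid ((r : Int) + dr) ((c : Int) + dc) = v)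
    = decide (v = pvG (pvShift W rows dr dc) r c) := by
  rw [pvShift_get W rows dr dc H r c hdr hdc hlen hrow hr hc, decide_eq_decide]
  by_cases h : (0 ≤ (r : Int) + dr ∧ (r : Int) + dr < (H : Int) ∧ 0 ≤ (c : Int) + dc ∧
      (c : Int) + dc < (W : Int))
  · rw [if_pos ⟨h.1, h.2.1, h.2.2.1, h.2.2.2⟩, heq _ _ h.1 h.2.1 h.2.2.1 h.2.2.2]
    constructor
    · rintro ⟨_, _, _, _, h5⟩; exact h5.symm
    · intro h5; exact ⟨h.1, h.2.1, h.2.2.1, h.2.2.2, h5.symm⟩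
  · rw [if_neg (fun hh => h ⟨hh.1, hh.2.1, hh.2.2.1, hh.2.2.2⟩)]
    constructor
    · rintro ⟨a, b, c', d, _⟩; exact absurd ⟨a, b, c', d⟩ h
    · intro h5; exact absurd h5 hv

-- A's nested 3×3 loop with the centre skipped, flattened to the 8-direction list
theorem pvAnyA (P : Int → Int → Bool) :
    ([(-1 : Int), 0, 1].any fun dr => [(-1 : Int), 0, 1].any fun dc =>
      if dr = 0 ∧ dc = 0 then false else P dr dc)
    = pvDirs.any (fun d => P d.1 d.2) := by
  norm_num [pvDirs, List.any_cons, List.any_nil, Bool.or_assoc]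

theorem transform_spec : Claim_equal_transform := by
  intro grid _ hpre
  unfold Spec_transform
  -- notation
  have hwnormN : (if grid.length ≠ 0 then (PySem.List.pyGetD grid 0 []).length else 0)
      = (PySem.List.pyGetD grid 0 []).length := by
    cases grid with | nil => decide | cons a l => simp
  have hwnormI : (if grid.length ≠ 0 then ((PySem.List.pyGetD grid 0 []).length : Int) else 0)
      = ((PySem.List.pyGetD grid 0 []).length : Int) := by
    cases grid with | nil => decide | cons a l => simp
  -- the W/H/rows of Source B
  let W : Nat := (PySem.List.pyGetD grid 0 []).length
  let rows : List (List Int) := grid.map (fun row => PySem.List.slice row none (some (W : Int)))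
  have hrows_len : rows.length = grid.length := by simp [rows]
  have hrow_len : ∀ i, i < grid.length → (rows[i]?.getD []).length = W := by
    intro i hi
    have hmem : grid[i] ∈ grid := List.getElem_mem hi
    have hWle : W ≤ grid[i].length := hpre _ hmem
    simp only [rows, List.getElem?_map, List.getElem?_eq_getElem hi, Option.map_some,
      Option.getD_some, PySem.List.slice_to_natCast, List.length_take]
    omega
  have hval : ∀ i j : Nat, j < W → pvG rows i j = pvG grid i j := by
    intro i j hj
    unfold pvG
    rw [List.getElem?_map]
    cases hgi : grid[i]? with
    | none => simp
    | some gi => simp [PySem.List.slice_to_natCast, hj]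
  have heq : ∀ i j : Int, 0 ≤ i → i < (grid.length : Int) → 0 ≤ j → j < (W : Int) →
      pvCell grid i j = pvG rows i.toNat j.toNat := by
    intro i j h1 h2 h3 h4
    rw [hval i.toNat j.toNat (by omega)]
    unfold pvCell pvG
    rw [PySem.List.pyGetD_of_nonneg _ _ h1, PySem.List.pyGetD_of_nonneg _ _ h3]
    simp [List.getD_eq_getElem?_getD]
  -- the folded mask
  obtain ⟨hMlen, hMrow, hMget⟩ := pvFold_spec W grid.length rows hrows_len hrow_len pvDirs
    (List.replicate grid.length (List.replicate W false)) (by decide) (by simp)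
    (fun i hi => by rw [List.getElem?_replicate, if_pos hi]; simp)
  set M := pvDirs.foldl (fun m d => pvMaskStep rows (pvShift W rows d.1 d.2) m)
    (List.replicate grid.length (List.replicate W false)) with hM
  -- both sides as explicit lists
  have hB : transform_alt grid = List.zipWith (fun mrow grow =>
      List.zipWith (fun m v => if m && (v != 0) then v else 0) mrow grow) M rows := by
    simp only [transform_alt, hwnormN]
    rfl
  have hA : transform grid = (PySem.List.pyRange 0 (grid.length : Int) 1).map (fun r =>
      (PySem.List.pyRange 0 ((W : Nat) : Int) 1).map (fun c =>
        let colour := pvCell grid r c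
        if colour = 0 then 0
        else
          let keep := [(-1 : Int), 0, 1].any (fun dr =>
            [(-1 : Int), 0, 1].any (fun dc =>
              if dr = 0 ∧ dc = 0 then false
              else
                decide (0 ≤ r + dr ∧ r + dr < (grid.length : Int) ∧ 0 ≤ c + dc ∧
                  c + dc < ((W : Nat) : Int) ∧ pvCell grid (r + dr) (c + dc) = colour)))
          if keep then colour else 0)) := by
    simp only [transform, hwnormI]
    rfl
  rw [hA, hB]
  apply List.ext_getElem?
  intro r
  by_cases hr : r < grid.length
  · rw [PySem.List.getElem?_map_pyRange_zero _ _ _ hr]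
    have hMr : M[r]? = some (M[r]'(by omega)) := List.getElem?_eq_getElem _
    have hRr : rows[r]? = some (rows[r]'(by omega)) := List.getElem?_eq_getElem _
    have hMrl : (M[r]'(by omega)).length = W := by
      have := hMrow r hr; rwa [hMr, Option.getD_some] at this
    have hRrl : (rows[r]'(by omega)).length = W := by
      have := hrow_len r hr; rwa [hRr, Option.getD_some] at this
    rw [List.getElem?_zipWith, hMr, hRr]
    simp only [Option.some.injEq]
    apply List.ext_getElem?
    intro c
    by_cases hc : c < W
    · rw [PySem.List.getElem?_map_pyRange_zero _ _ _ hc, List.getElem?_zipWith,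
        List.getElem?_eq_getElem (show c < (M[r]'(by omega)).length by omega),
        List.getElem?_eq_getElem (show c < (rows[r]'(by omega)).length by omega)]
      simp only [Option.some.injEq]
      -- values
      have hmv : (M[r]'(by omega))[c]'(by omega) = pvGB M r c := by
        unfold pvGB
        rw [hMr, Option.getD_some, List.getElem?_eq_getElem (show c < (M[r]'(by omega)).length by omega), Option.getD_some]
      have hrv : (rows[r]'(by omega))[c]'(by omega) = pvG rows r c := by
        unfold pvG
        rw [hRr, Option.getD_some, List.getElem?_eq_getElem (show c < (rows[r]'(by omega)).length by omega), Option.getD_some]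
      have hcell : pvCell grid (r : Int) (c : Int) = pvG rows r c := by
        have := heq (r : Int) (c : Int) (by omega) (by omega) (by omega) (by omega)
        simpa using this
      rw [hmv, hrv, hcell]
      by_cases hv : pvG rows r c = 0
      · simp [hv]
      · rw [if_neg hv]
        have hne : (pvG rows r c != 0) = true := by simp [hv]
        rw [hne, Bool.and_true]
        have hkeep : ([(-1 : Int), 0, 1].any fun dr => [(-1 : Int), 0, 1].any fun dc =>
            if dr = 0 ∧ dc = 0 then false
            else decide (0 ≤ (r : Int) + dr ∧ (r : Int) + dr < (grid.length : Int) ∧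
              0 ≤ (c : Int) + dc ∧ (c : Int) + dc < ((W : Nat) : Int) ∧
              pvCell grid ((r : Int) + dr) ((c : Int) + dc) = pvG rows r c))
            = pvGB M r c := by
          rw [pvAnyA]
          rw [hMget r c hr hc]
          have h0 : pvGB (List.replicate grid.length (List.replicate W false)) r c = false := by
            unfold pvGB
            rw [List.getElem?_replicate, if_pos hr, Option.getD_some, List.getElem?_replicate]
            split <;> rfl
          rw [h0, Bool.false_or]
          apply pvAny_congr
          intro d hd
          fin_cases hd <;>
            exact pvTerm_eq grid rows W grid.length r c _ _ (pvG rows r c)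
              (by norm_num) (by norm_num) hrows_len hrow_len heq hr hc hv
        rw [hkeep]
    · rw [List.getElem?_eq_none, List.getElem?_eq_none]
      · rw [List.length_zipWith]; omega
      · rw [List.length_map, PySem.List.length_pyRange_one]; omega
  · rw [List.getElem?_eq_none, List.getElem?_eq_none]
    · rw [List.length_zipWith]; omega
    · rw [List.length_map, PySem.List.length_pyRange_one]; omega
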